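-- pv_equiv track=rewrite | github.com/philipsoitu/project-euler | python solutions/p166.py | possibleSummations
-- ===== SOURCE A (Python) =====
-- def possibleSummations(n):
--     ans = []
--     for a in range(10):
--         for b in range(10):
--             if (a+b) > n:
--                 break
--             for c in range(10):
--                 if (a+b+c) > n:
--                     break
--                 for d in range(10):
--                     if (a+b+c) > n:
--                         break
--                     if (a+b+c+d) == n:
--                         ans.append([a, b, c, d])
--     return ans
-- ===== SOURCE B (Python) =====
-- def possibleSummations(n):
--     def gen(k, s):
--         if k == 0:
--             return [[]] if s == 0 else []
--         return [[d] + rest for d in range(10) for rest in gen(k - 1, s - d)]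
--     return gen(4, n)
-- ===== Notes on version B (the rewrite author's own statement) =====
-- stated objective: alternative
-- what changed: The four nested break-guarded loops are replaced by a recursive generator gen(k, s) that builds all k-digit lists (digits 0-9) summing to s by prefixing each digit d to the solutions of gen(k-1, s-d); the list comprehension yields the same lexicographic order.
import Mathlib
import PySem

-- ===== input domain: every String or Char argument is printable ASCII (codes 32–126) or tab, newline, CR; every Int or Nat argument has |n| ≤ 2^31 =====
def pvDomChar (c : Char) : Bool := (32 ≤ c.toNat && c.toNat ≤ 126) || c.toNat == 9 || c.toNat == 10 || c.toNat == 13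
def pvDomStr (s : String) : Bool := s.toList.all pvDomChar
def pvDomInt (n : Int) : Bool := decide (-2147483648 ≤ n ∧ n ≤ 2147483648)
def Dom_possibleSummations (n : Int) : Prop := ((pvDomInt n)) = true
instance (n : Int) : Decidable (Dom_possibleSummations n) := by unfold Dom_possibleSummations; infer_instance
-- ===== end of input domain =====

-- B replaces A's four nested break-guarded loops by a recursive generator over the number of remaining digits (alternative decomposition, same order of results).

-- ===== PORT A =====
-- innermost 'for d in range(10)' with its break and the == n append
def pvALoopD (n a b c : Int) : List Int → List (List Int)
  | [] => []
  | d :: rest =>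
      if a + b + c > n then []
      else (if a + b + c + d = n then [[a, b, c, d]] else []) ++ pvALoopD n a b c rest

-- 'for c in range(10)' with its break
def pvALoopC (n a b : Int) : List Int → List (List Int)
  | [] => []
  | c :: rest =>
      if a + b + c > n then []
      else pvALoopD n a b c (PySem.List.pyRange 0 10 1) ++ pvALoopC n a b rest

-- 'for b in range(10)' with its break
def pvALoopB (n a : Int) : List Int → List (List Int)
  | [] => []
  | b :: rest =>
      if a + b > n then []
      else pvALoopC n a b (PySem.List.pyRange 0 10 1) ++ pvALoopB n a rest

-- 'for a in range(10)'
def pvALoopA (n : Int) : List Int → List (List Int)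
  | [] => []
  | a :: rest => pvALoopB n a (PySem.List.pyRange 0 10 1) ++ pvALoopA n rest

def possibleSummations (n : Int) : List (List Int) :=
  pvALoopA n (PySem.List.pyRange 0 10 1)

-- ===== PORT B =====
-- gen(k, s): all k-digit lists (digits 0..9) summing to s, lexicographic; the
-- comprehension '[[d] + rest for d in range(10) for rest in gen(k-1, s-d)]' is the flatMap/map below
def pvGen : Nat → Int → List (List Int)
  | 0, s => if s = 0 then [[]] else []
  | k + 1, s =>
      (PySem.List.pyRange 0 10 1).flatMap (fun d => (pvGen k (s - d)).map (fun rest => d :: rest))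

def possibleSummations_alt (n : Int) : List (List Int) := pvGen 4 n

-- ===== PRECONDITION & SPEC =====
def Spec_possibleSummations (n : Int) (out : List (List Int)) : Prop := out = possibleSummations_alt n
instance (n : Int) (out : List (List Int)) : Decidable (Spec_possibleSummations n out) := by unfold Spec_possibleSummations; infer_instance

-- ===== CLAIM (what is proved, stated in full; the proofs are below) =====
def Claim_equal_possibleSummations : Prop := ∀ (n : Int), Dom_possibleSummations n → Spec_possibleSummations n (possibleSummations n)

-- ===== LEMMAS AND PROOFS =====
theorem pvRange10 : PySem.List.pyRange 0 10 1 = [0,1,2,3,4,5,6,7,8,9] := by decide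

-- pvGen collects nothing for a negative remaining sum
theorem pvGen_neg : ∀ (k : Nat) (s : Int), s < 0 → pvGen k s = [] := by
  intro k
  induction k with
  | zero => intro s hs; simp only [pvGen]; rw [if_neg (by omega)]
  | succ k ih =>
      intro s hs
      simp only [pvGen, List.flatMap_eq_nil_iff, List.map_eq_nil_iff]
      intro d hd
      rw [pvRange10] at hd
      apply ih
      fin_cases hd <;> omega

-- closed form of the one-digit generator
theorem pvGen_one (s : Int) : pvGen 1 s = if 0 ≤ s ∧ s ≤ 9 then [[s]] else [] := by
  by_cases h : 0 ≤ s ∧ s ≤ 9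
  · rw [if_pos h]
    obtain ⟨h0, h9⟩ := h
    interval_cases s <;> decide
  · rw [if_neg h]
    simp only [pvGen, List.flatMap_eq_nil_iff, List.map_eq_nil_iff]
    intro d hd
    rw [pvRange10] at hd
    rw [if_neg]
    fin_cases hd <;> omega

-- if no element of ds solves a+b+c+d = n, the d-loop collects nothing
theorem pvLoopD_none (n a b c : Int) (h : ¬ a + b + c > n) (ds : List Int)
    (hds : ∀ d ∈ ds, a + b + c + d ≠ n) : pvALoopD n a b c ds = [] := by
  induction ds with
  | nil => rfl
  | cons d rest ih =>
      simp only [pvALoopD, if_neg h, if_neg (hds d (by simp))]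
      exact ih (fun d hd => hds d (by simp [hd]))

-- the d-loop equals the one-digit generator (prefixed with a, b, c)
theorem pvLoopD_gen (n a b c : Int) :
    pvALoopD n a b c (PySem.List.pyRange 0 10 1)
      = (pvGen 1 (n - a - b - c)).map (fun t => a :: b :: c :: t) := by
  by_cases h : a + b + c > n
  · rw [pvGen_neg 1 _ (by omega), pvRange10]
    simp [pvALoopD, h]
  · rw [pvGen_one]
    obtain ⟨s, hn⟩ : ∃ s, n = a + b + c + s := ⟨n - a - b - c, by ring⟩
    have h0 : 0 ≤ s := by omega
    subst hn
    have hs : a + b + c + s - a - b - c = s := by ring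
    rw [hs]
    by_cases h9 : s ≤ 9
    · rw [if_pos ⟨h0, h9⟩, pvRange10]
      interval_cases s <;> norm_num [pvALoopD]
    · rw [if_neg (by omega), pvLoopD_none _ _ _ _ h]
      · rfl
      · intro d hd
        rw [pvRange10] at hd
        fin_cases hd <;> omega

-- break elimination for the c-loop over a sorted nonnegative list
theorem pvLoopC_flat (n a b : Int) (cs : List Int) (hsort : List.Pairwise (· ≤ ·) cs)
    (hpos : ∀ c ∈ cs, 0 ≤ c) :
    pvALoopC n a b cs
      = cs.flatMap (fun c => (pvGen 1 (n - a - b - c)).map (fun t => a :: b :: c :: t)) := by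
  induction cs with
  | nil => rfl
  | cons c rest ih =>
      rw [List.pairwise_cons] at hsort
      obtain ⟨hle, hrest⟩ := hsort
      simp only [pvALoopC, List.flatMap_cons]
      by_cases h : a + b + c > n
      · rw [if_pos h, pvGen_neg 1 _ (by omega)]
        simp only [List.map_nil, List.nil_append]
        symm
        rw [List.flatMap_eq_nil_iff]
        intro c' hc'
        rw [pvGen_neg 1 _ (by have := hle c' hc'; omega)]
        rfl
      · rw [if_neg h, pvLoopD_gen, ih hrest (fun x hx => hpos x (by simp [hx]))]

theorem pvGen_two (s : Int) :
    pvGen 2 s = (PySem.List.pyRange 0 10 1).flatMap (fun c => (pvGen 1 (s - c)).map (fun t => c :: t)) := rfl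

-- the c-loop over range(10) equals the two-digit generator (prefixed with a, b)
theorem pvLoopC_gen (n a b : Int) :
    pvALoopC n a b (PySem.List.pyRange 0 10 1)
      = (pvGen 2 (n - a - b)).map (fun t => a :: b :: t) := by
  rw [pvLoopC_flat n a b _ (by rw [pvRange10]; decide) (by rw [pvRange10]; decide), pvGen_two,
      List.map_flatMap]
  apply List.flatMap_congr
  intro c _
  rw [List.map_map]
  rfl

-- break elimination for the b-loop over a sorted nonnegative list
theorem pvLoopB_flat (n a : Int) (bs : List Int) (hsort : List.Pairwise (· ≤ ·) bs)
    (hpos : ∀ b ∈ bs, 0 ≤ b) :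
    pvALoopB n a bs
      = bs.flatMap (fun b => (pvGen 2 (n - a - b)).map (fun t => a :: b :: t)) := by
  induction bs with
  | nil => rfl
  | cons b rest ih =>
      rw [List.pairwise_cons] at hsort
      obtain ⟨hle, hrest⟩ := hsort
      simp only [pvALoopB, List.flatMap_cons]
      by_cases h : a + b > n
      · rw [if_pos h, pvGen_neg 2 _ (by omega)]
        simp only [List.map_nil, List.nil_append]
        symm
        rw [List.flatMap_eq_nil_iff]
        intro b' hb'
        rw [pvGen_neg 2 _ (by have := hle b' hb'; omega)]
        rfl
      · rw [if_neg h, pvLoopC_gen, ih hrest (fun x hx => hpos x (by simp [hx]))]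

theorem pvGen_three (s : Int) :
    pvGen 3 s = (PySem.List.pyRange 0 10 1).flatMap (fun b => (pvGen 2 (s - b)).map (fun t => b :: t)) := rfl

-- the b-loop over range(10) equals the three-digit generator (prefixed with a)
theorem pvLoopB_gen (n a : Int) :
    pvALoopB n a (PySem.List.pyRange 0 10 1)
      = (pvGen 3 (n - a)).map (fun t => a :: t) := by
  rw [pvLoopB_flat n a _ (by rw [pvRange10]; decide) (by rw [pvRange10]; decide), pvGen_three,
      List.map_flatMap]
  apply List.flatMap_congr
  intro b _
  rw [List.map_map]
  rfl

-- the a-loop has no break: plain flatMap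
theorem pvLoopA_flat (n : Int) (as : List Int) :
    pvALoopA n as = as.flatMap (fun a => (pvGen 3 (n - a)).map (fun t => a :: t)) := by
  induction as with
  | nil => rfl
  | cons a rest ih => simp only [pvALoopA, List.flatMap_cons, pvLoopB_gen, ih]

-- ===== VERDICT (by name: the statement is the Claim_ definition above) =====
theorem possibleSummations_spec : Claim_equal_possibleSummations := by
  intro n _
  unfold Spec_possibleSummations possibleSummations possibleSummations_alt
  rw [pvLoopA_flat]
  rfl
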